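-- pv_equiv track=rewrite | github.com/refschool/exercice-python | khella/khella6.py | distance_signature
-- ===== SOURCE A (Python) =====
-- def distance_signature(sig1,sig2):
--     kdistance = 0
--     for key in sig1:
--         value1 = sig1[key]
--         if(key in sig2):
--             value2 = sig2[key]
--         else:
--             value2 = 0
--         kdistance = kdistance + ((value1 - value2) ** 2)
--
--     for key in sig2:
--         value2 = sig2[key]
--         if(key not in sig1):
--             kdistance = kdistance + ((value2) ** 2)
--     return kdistance
-- ===== SOURCE B (Python) =====
-- def distance_signature(sig1, sig2):
--     return sum((sig1.get(k, 0) - sig2.get(k, 0)) ** 2 for k in set(sig1) | set(sig2))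
-- ===== Notes on version B (the rewrite author's own statement) =====
-- stated objective: simpler
-- what changed: Replaces A's two asymmetric loops (one over sig1 with a matched lookup, one over sig2 restricted to keys missing from sig1) by a single sum comprehension over the union of the key sets with symmetric .get(k, 0) defaults.
import Mathlib
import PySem

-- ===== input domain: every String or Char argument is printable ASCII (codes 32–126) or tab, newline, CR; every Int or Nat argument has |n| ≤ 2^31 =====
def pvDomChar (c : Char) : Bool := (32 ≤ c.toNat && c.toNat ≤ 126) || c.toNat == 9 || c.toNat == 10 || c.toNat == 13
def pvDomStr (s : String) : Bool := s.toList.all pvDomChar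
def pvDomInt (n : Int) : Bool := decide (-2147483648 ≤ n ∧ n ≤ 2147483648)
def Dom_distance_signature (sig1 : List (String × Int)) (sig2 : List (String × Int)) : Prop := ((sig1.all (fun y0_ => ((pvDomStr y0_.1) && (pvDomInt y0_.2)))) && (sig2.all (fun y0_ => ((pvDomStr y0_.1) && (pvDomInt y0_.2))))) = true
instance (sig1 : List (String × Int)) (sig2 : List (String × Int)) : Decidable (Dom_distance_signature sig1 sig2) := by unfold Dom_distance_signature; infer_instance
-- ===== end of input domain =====

-- B replaces A's two asymmetric loops by one sum over the union of the key sets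
-- with symmetric .get(k, 0) defaults (simpler decomposition, same cost).


-- ===== PORT A =====
-- A: loop over sig1's keys adding (v1 - v2)^2 with v2 = sig2's value or 0,
-- then loop over sig2's keys not in sig1 adding v2^2.
def distance_signature (sig1 : List (String × Int)) (sig2 : List (String × Int)) : Int :=
  let d1 := PySem.Dict.ofList sig1
  let d2 := PySem.Dict.ofList sig2
  let kdistance : Int :=
    d1.keys.foldl (fun kdistance key =>
      let value1 := d1.getD key 0
      let value2 := if d2.contains key then d2.getD key 0 else 0
      kdistance + (value1 - value2) ^ 2) 0
  d2.keys.foldl (fun kdistance key =>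
    let value2 := d2.getD key 0
    if ¬ (d1.contains key = true) then kdistance + value2 ^ 2 else kdistance) kdistance

-- ===== PORT B =====
-- B: sum of (sig1.get(k,0) - sig2.get(k,0))^2 over set(sig1) | set(sig2)
-- (the set iteration order is irrelevant: sums of Int commute).
def distance_signature_alt (sig1 : List (String × Int)) (sig2 : List (String × Int)) : Int :=
  let d1 := PySem.Dict.ofList sig1
  let d2 := PySem.Dict.ofList sig2
  let keys := PySem.Set.union (PySem.Set.ofList d1.keys) (PySem.Set.ofList d2.keys)
  (keys.map (fun k => (d1.getD k 0 - d2.getD k 0) ^ 2)).sum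

-- ===== PRECONDITION & SPEC =====
def Spec_distance_signature (sig1 : List (String × Int)) (sig2 : List (String × Int)) (out : Int) : Prop := out = distance_signature_alt sig1 sig2
instance (sig1 : List (String × Int)) (sig2 : List (String × Int)) (out : Int) : Decidable (Spec_distance_signature sig1 sig2 out) := by unfold Spec_distance_signature; infer_instance

-- ===== CLAIM (what is proved, stated in full; the proofs are below) =====
def Claim_equal_distance_signature : Prop := ∀ (sig1 : List (String × Int)) (sig2 : List (String × Int)), Dom_distance_signature sig1 sig2 → Spec_distance_signature sig1 sig2 (distance_signature sig1 sig2)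

-- ===== LEMMAS AND PROOFS =====

-- a guarded accumulating loop is the sum over the filtered list
theorem foldl_add_if_eq_sum_filter {α : Type} (p : α → Bool) (g : α → Int) :
    ∀ (l : List α) (a : Int),
      l.foldl (fun acc x => if p x then acc + g x else acc) a
        = a + ((l.filter p).map g).sum := by
  intro l
  induction l with
  | nil => simp
  | cons x t ih =>
      intro a
      by_cases hp : p x = true
      · simp [List.foldl_cons, hp, ih, add_assoc]
      · simp [List.foldl_cons, hp, ih]

-- folding Set.add over a Nodup list appends exactly the elements not already present
theorem foldl_set_add_of_nodup {α : Type} [DecidableEq α] :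
    ∀ (l : List α), l.Nodup → ∀ (s : PySem.Set α),
      l.foldl PySem.Set.add s = s ++ l.filter (fun x => ¬ s.contains x = true) := by
  intro l
  induction l with
  | nil => intro _ s; simp
  | cons x t ih =>
      intro hnd s
      have hx : x ∉ t := (List.nodup_cons.mp hnd).1
      have hnt : t.Nodup := (List.nodup_cons.mp hnd).2
      by_cases hc : s.contains x = true
      · have hm : x ∈ s := by simpa using hc
        have hadd : PySem.Set.add s x = s := by simp [PySem.Set.add, hm]
        rw [List.foldl_cons, hadd, ih hnt s]
        simp [hm]
      · have hm : x ∉ s := by simpa using hc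
        have hadd : PySem.Set.add s x = s ++ [x] := by simp [PySem.Set.add, hm]
        rw [List.foldl_cons, hadd, ih hnt (s ++ [x])]
        have hfilt : t.filter (fun y => ¬ (s ++ [x]).contains y = true)
            = t.filter (fun y => ¬ s.contains y = true) := by
          apply List.filter_congr
          intro y hy
          have hne : y ≠ x := fun h => hx (h ▸ hy)
          simp [hne]
        rw [hfilt]
        simp [hm, List.append_assoc]

theorem distance_signature_eq (sig1 : List (String × Int)) (sig2 : List (String × Int)) :
    distance_signature sig1 sig2 = distance_signature_alt sig1 sig2 := by
  unfold distance_signature distance_signature_alt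
  set d1 := PySem.Dict.ofList sig1 with hd1
  set d2 := PySem.Dict.ofList sig2 with hd2
  simp only []
  -- first loop of A: the `if` is redundant because getD returns the default 0 when absent
  have hfun1 : (fun (kdistance : Int) (key : String) =>
        kdistance + (d1.getD key 0 - (if d2.contains key then d2.getD key 0 else 0)) ^ 2)
      = (fun kdistance key => kdistance + (d1.getD key 0 - d2.getD key 0) ^ 2) := by
    funext acc key
    by_cases hc : d2.contains key = true
    · simp [hc]
    · have h0 : d2.getD key 0 = 0 := PySem.Dict.getD_of_not_contains _ 0 (by simpa using hc)
      simp [hc, h0]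
  rw [hfun1, PySem.List.foldl_add (g := fun key => (d1.getD key 0 - d2.getD key 0) ^ 2)]
  -- second loop of A: a guarded accumulation over d2.keys
  have hfun2 : (fun (kdistance : Int) (key : String) =>
        if ¬ (d1.contains key = true) then kdistance + (d2.getD key 0) ^ 2 else kdistance)
      = (fun kdistance key => if !(d1.contains key) then kdistance + (d2.getD key 0) ^ 2 else kdistance) := by
    funext acc key; by_cases hc : d1.contains key = true <;> simp [hc]
  rw [hfun2, foldl_add_if_eq_sum_filter]
  -- B's key union: d1.keys followed by d2.keys not contained in d1.keys
  have hnd1 : d1.keys.Nodup := PySem.Dict.nodup_keys_ofList sig1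
  have hnd2 : d2.keys.Nodup := PySem.Dict.nodup_keys_ofList sig2
  have hof1 : PySem.Set.ofList d1.keys = d1.keys := by
    have := foldl_set_add_of_nodup d1.keys hnd1 []
    simpa [PySem.Set.ofList_eq_foldl] using this
  have hof2 : PySem.Set.ofList d2.keys = d2.keys := by
    have := foldl_set_add_of_nodup d2.keys hnd2 []
    simpa [PySem.Set.ofList_eq_foldl] using this
  have hunion : PySem.Set.union (PySem.Set.ofList d1.keys) (PySem.Set.ofList d2.keys)
      = d1.keys ++ d2.keys.filter (fun k => ¬ d1.keys.contains k = true) := by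
    rw [hof1, hof2]
    exact foldl_set_add_of_nodup d2.keys hnd2 d1.keys
  rw [hunion, List.map_append, List.sum_append]
  -- align the two filtered tails
  have hcontains : ∀ k, d1.contains k = d1.keys.contains k := by
    intro k
    rw [PySem.Dict.contains_eq_decide_mem_keys]
    simp
  have hfiltEq : d2.keys.filter (fun k => !(d1.contains k))
      = d2.keys.filter (fun k => ¬ d1.keys.contains k = true) := by
    apply List.filter_congr
    intro k _
    rw [hcontains k]
    by_cases h : d1.keys.contains k = true <;> simp_all
  rw [hfiltEq]
  -- on keys absent from d1, (v1 - v2)^2 = v2^2 since v1 defaults to 0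
  have hmap : (d2.keys.filter (fun k => ¬ d1.keys.contains k = true)).map
        (fun k => (d2.getD k 0) ^ 2)
      = (d2.keys.filter (fun k => ¬ d1.keys.contains k = true)).map
        (fun k => (d1.getD k 0 - d2.getD k 0) ^ 2) := by
    apply List.map_congr_left
    intro k hk
    have hnot : d1.contains k = false := by
      have := List.of_mem_filter hk
      rw [hcontains k]
      simpa using this
    rw [PySem.Dict.getD_of_not_contains _ 0 hnot]
    ring
  rw [hmap]
  ring

-- ===== VERDICT (by name: the statement is the Claim_ definition above) =====
theorem distance_signature_spec : Claim_equal_distance_signature := by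
  intro sig1 sig2 _
  exact distance_signature_eq sig1 sig2
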